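-- pv_equiv track=rewrite | github.com/xxtiagooo/Orbito-n-FP | FP2425P2.py | posicoes_tabuleiro
-- ===== SOURCE A (Python) =====
-- def cria_posicao(col, lin):
--     """ str x int -> posicao
--     cria uma posição com base nos inputs do utilizador
--     coluna - string entre 'a' e 'j'
--     linha - inteiro entre 1 e 10"""
--     colunas = ('a', 'b', 'c', 'd', 'e', 'f', 'g', 'h', 'i', 'j')
--     linhas = (range(1, 11))
--     if not (type(col) == str and col in colunas and type(lin) == int and lin in linhas):
--         raise ValueError("cria_posicao: argumentos invalidos")
--     return (col, lin)
--
-- def obtem_pos_col(p):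
--     """ posicao -> str
--     devolve a coluna onde a posição está inserida"""
--     return p[0]
--
-- def obtem_pos_lin(p):
--     """ posicao -> int
--     devolve a linha onde a posição está inserida"""
--     return p[1]
--
-- def coluna_para_numeros(p):  # auxiliar
--     """posicao -> int
--     transforma a coluna em numeros"""
--     return ord(obtem_pos_col(p)) - ord('a')
--
-- def posicoes_tabuleiro(t, n):  # auxiliar posicao seguinte
--     """tabuleiro x int -> tuplo"""
--     posicoes = {}
--     colunas = ('a', 'b', 'c', 'd', 'e', 'f', 'g', 'h', 'i', 'j')
--     linhas = tuple(range(1, 11))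
--     colunas_n = colunas[:2*n]
--     linhas_n = linhas[:2*n]
--     for coluna in colunas_n:
--         for linha in linhas_n:
--             pos = (cria_posicao(coluna, linha))
--             if obtem_orbita_posicao(pos, n) not in posicoes:
--                 posicoes[obtem_orbita_posicao(pos, n)] = (pos,)
--             else:
--                 posicoes[obtem_orbita_posicao(pos, n)] += (pos,)
--     return posicoes
--
-- def obtem_orbita_posicao(p, n):  # auxiliar
--     """posicao x int -> int
--     obtem a orbita da posicao, sendo 0 a mais interior"""
--     col = coluna_para_numeros(p)
--     lin = obtem_pos_lin(p) - 1  # comeca no 0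
--     # contagem de fora para dentro
--     orb_inv = min(col, lin, (2*n-1)-col, (2*n-1)-lin)  # ver o minimo de coluna e linha a contar de cada "lado" do tabuleiro
--     return abs(orb_inv - n)  # inverter a contagem
-- ===== SOURCE B (Python) =====
-- def _orbita(ci, lin, n):
--     # orbit of a position given its 0-based column index, 1-based line and n
--     return abs(min(ci, lin - 1, (2 * n - 1) - ci, (2 * n - 1) - (lin - 1)) - n)
--
-- def posicoes_tabuleiro(t, n):
--     """tabuleiro x int -> dict: orbit -> tuple of positions (column-major order)."""
--     colunas = ('a', 'b', 'c', 'd', 'e', 'f', 'g', 'h', 'i', 'j')[:2 * n]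
--     linhas = tuple(range(1, 11))[:2 * n]
--     pares = [((c, l), _orbita(ord(c) - ord('a'), l, n)) for c in colunas for l in linhas]
--     orbitas = list(dict.fromkeys(o for _, o in pares))
--     return {o: tuple(p for p, q in pares if q == o) for o in orbitas}
-- ===== Notes on version B (the rewrite author's own statement) =====
-- stated objective: alternative
-- what changed: A fills a dict incrementally inside nested column/line loops; B flattens the board into one (position, orbit) pair list, dedups the orbit values in first-occurrence order with dict.fromkeys, and builds each group by filtering the pair list per orbit.
import Mathlib
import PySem

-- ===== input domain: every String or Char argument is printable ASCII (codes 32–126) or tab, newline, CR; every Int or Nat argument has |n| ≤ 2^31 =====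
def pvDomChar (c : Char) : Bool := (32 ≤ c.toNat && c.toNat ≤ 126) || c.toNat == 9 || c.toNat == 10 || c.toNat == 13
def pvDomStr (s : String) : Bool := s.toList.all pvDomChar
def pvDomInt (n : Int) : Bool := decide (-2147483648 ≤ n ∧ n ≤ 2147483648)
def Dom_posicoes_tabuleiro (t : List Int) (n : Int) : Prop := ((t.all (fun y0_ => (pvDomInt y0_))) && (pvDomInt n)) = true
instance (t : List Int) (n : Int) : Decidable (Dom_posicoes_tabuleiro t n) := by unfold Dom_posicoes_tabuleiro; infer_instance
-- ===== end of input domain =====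

-- B replaces A's incremental dict fill with flatten + ordered dedup + per-orbit filter (alternative decomposition, same results).

-- ===== PORT A =====
-- ord(s) for the nonempty one-character column strings used here (exact on them)
def pvOrd (s : String) : Int := ((s.toList.headD ' ').toNat : Int)

def pvColunas : List String := ["a", "b", "c", "d", "e", "f", "g", "h", "i", "j"]

-- cria_posicao: the ValueError branch is unreachable here (arguments are always drawn
-- from the literal column tuple and lines 1..10), so the port returns the pair directly.
def cria_posicao (col : String) (lin : Int) : String × Int := (col, lin)

def obtem_pos_col (p : String × Int) : String := p.1

def obtem_pos_lin (p : String × Int) : Int := p.2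

def coluna_para_numeros (p : String × Int) : Int := pvOrd (obtem_pos_col p) - pvOrd "a"

def obtem_orbita_posicao (p : String × Int) (n : Int) : Int :=
  let col := coluna_para_numeros p
  let lin := obtem_pos_lin p - 1
  -- Python's min(a, b, c, d) folds from the left
  let orb_inv := min (min (min col lin) ((2*n-1) - col)) ((2*n-1) - lin)
  |orb_inv - n|

def posicoes_tabuleiro (t : List Int) (n : Int) : List (Int × List (String × Int)) :=
  let colunas_n := PySem.List.slice pvColunas none (some (2*n))
  let linhas_n := PySem.List.slice (PySem.List.pyRange 1 11 1) none (some (2*n))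
  let posicoes : PySem.Dict Int (List (String × Int)) :=
    colunas_n.foldl (fun d coluna =>
      linhas_n.foldl (fun d linha =>
        let pos := cria_posicao coluna linha
        let k := obtem_orbita_posicao pos n
        if d.contains k = false then d.insert k [pos]
        else d.insert k (d.getD k [] ++ [pos])) d) PySem.Dict.empty
  posicoes.items

-- ===== PORT B =====
-- orbit from 0-based column index, 1-based line and n (Source B's _orbita)
def pvOrbitaB (ci : Int) (lin : Int) (n : Int) : Int :=
  |min (min (min ci (lin - 1)) ((2*n-1) - ci)) ((2*n-1) - (lin - 1)) - n|

def posicoes_tabuleiro_alt (t : List Int) (n : Int) : List (Int × List (String × Int)) :=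
  let colunas := PySem.List.slice pvColunas none (some (2*n))
  let linhas := PySem.List.slice (PySem.List.pyRange 1 11 1) none (some (2*n))
  let pares := colunas.flatMap (fun c => linhas.map (fun l => ((c, l), pvOrbitaB (pvOrd c - pvOrd "a") l n)))
  let orbitas := PySem.List.dedup (pares.map (·.2))
  orbitas.map (fun o => (o, (pares.filter (fun p => p.2 == o)).map (·.1)))

-- ===== PRECONDITION & SPEC =====
def Spec_posicoes_tabuleiro (t : List Int) (n : Int) (out : List (Int × List (String × Int))) : Prop := out = posicoes_tabuleiro_alt t n
instance (t : List Int) (n : Int) (out : List (Int × List (String × Int))) : Decidable (Spec_posicoes_tabuleiro t n out) := by unfold Spec_posicoes_tabuleiro; infer_instance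

-- ===== CLAIM (what is proved, stated in full; the proofs are below) =====
def Claim_equal_posicoes_tabuleiro : Prop := ∀ (t : List Int) (n : Int), Dom_posicoes_tabuleiro t n → Spec_posicoes_tabuleiro t n (posicoes_tabuleiro t n)

-- ===== LEMMAS AND PROOFS =====

-- A's loop body is exactly Dict.modify at the orbit key
lemma stepA_eq_modify (d : PySem.Dict Int (List (String × Int))) (k : Int) (pos : String × Int) :
    (if d.contains k = false then d.insert k [pos] else d.insert k (d.getD k [] ++ [pos]))
      = d.modify k [] (· ++ [pos]) := by
  by_cases hc : d.contains k = true
  · simp [hc, PySem.Dict.modify]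
  · simp only [Bool.not_eq_true] at hc
    simp [hc, PySem.Dict.modify, PySem.Dict.getD_of_not_contains (h := hc)]

-- generic: the modify-grouping fold over any pair list produces exactly
-- first-occurrence keys, each with the filtered projected values
lemma grouping_fold_items (pares : List ((String × Int) × Int)) :
    (pares.foldl (fun d q => d.modify q.2 [] (· ++ [q.1])) PySem.Dict.empty).items
      = (PySem.List.dedup (pares.map (·.2))).map
          (fun o => (o, (pares.filter (fun p => p.2 == o)).map (·.1))) := by
  set D := pares.foldl (fun d q => d.modify q.2 [] (· ++ [q.1]))
    (PySem.Dict.empty : PySem.Dict Int (List (String × Int))) with hD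
  have hkeys : D.keys = PySem.Set.ofList (pares.map (·.2)) := by
    rw [hD, PySem.Dict.keys_foldl_modify_key]
    simp [PySem.Dict.keys_empty, PySem.Set.update_nil_left]
  have hnd : D.keys.Nodup := by
    rw [hkeys]; exact PySem.Set.nodup_ofList _
  have hget : ∀ o : Int, D.getD o [] = (pares.filter (fun p => p.2 == o)).map (·.1) := by
    intro o
    have hswap : D = (pares.map Prod.swap).foldl
        (fun d p => d.modify p.1 [] (· ++ [p.2])) PySem.Dict.empty := by
      rw [hD, List.foldl_map]; rfl
    rw [hswap, PySem.Dict.getD_foldl_modify_append]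
    rw [List.filter_map]
    simp [Function.comp_def, Prod.swap, List.map_map, PySem.Dict.getD_empty]
  rw [PySem.Dict.items_eq_map_keys D hnd [], hkeys, PySem.List.dedup_eq_ofList]
  exact List.map_congr_left (fun o _ => by rw [hget o])

-- ===== VERDICT (by name: the statement is the Claim_ definition above) =====
theorem posicoes_tabuleiro_spec : Claim_equal_posicoes_tabuleiro := by
  intro t n _
  unfold Spec_posicoes_tabuleiro posicoes_tabuleiro posicoes_tabuleiro_alt
  simp only []
  set cols := PySem.List.slice pvColunas none (some (2*n)) with hcols
  set lins := PySem.List.slice (PySem.List.pyRange 1 11 1) none (some (2*n)) with hlins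
  set pares := cols.flatMap (fun c => lins.map (fun l => ((c, l), pvOrbitaB (pvOrd c - pvOrd "a") l n))) with hpares
  have hnest :
      cols.foldl (fun d coluna =>
        lins.foldl (fun d linha =>
          let pos := cria_posicao coluna linha
          let k := obtem_orbita_posicao pos n
          if d.contains k = false then d.insert k [pos]
          else d.insert k (d.getD k [] ++ [pos])) d)
        (PySem.Dict.empty : PySem.Dict Int (List (String × Int)))
      = pares.foldl (fun d q => d.modify q.2 [] (· ++ [q.1])) PySem.Dict.empty := by
    rw [hpares, List.foldl_flatMap]
    apply PySem.List.foldl_congr_mem'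
    intro c _ d
    rw [List.foldl_map]
    apply PySem.List.foldl_congr_mem'
    intro l _ d'
    show (if d'.contains (obtem_orbita_posicao (cria_posicao c l) n) = false then _ else _) = _
    rw [stepA_eq_modify]
    rfl
  rw [hnest, grouping_fold_items]
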